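-- pv_equiv track=rewrite | github.com/NDesumeur/StageL3-methode-Source-et-Faits | classes/utils/Borda.py | calculer
-- ===== SOURCE A (Python) =====
-- def calculer(liste_scores_configurations):
--     """
--     liste_scores_configurations : liste de dictionnaires.
--     Chaque dictionnaire représente un "Cas" (ex: la grille '0' en 50pct_2ano)
--     et contient les scores (ex: F1-Score) des 9 candidats.
--
--     Exemple :
--     [
--         {'IF': 100, 'LOF': 90, 'EE': 45, 'Min': 45, 'Max': 100, 'Avg': 78, 'Hard': 100, 'Soft': 45, 'S&F': 100},
--         {'IF': 80, 'LOF': 80, ...},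
--         ... (x40)
--     ]
--
--     Retourne :
--     Dictionnaire des scores finaux de Borda, trié du gagnant absolu au perdant.
--     """
--     if not liste_scores_configurations:
--         return {}
--
--     # 1. Identifier tous les candidats depuis la première configuration
--     # on prend la première configuration pour extraire les noms des candidats (ex: 'IF', 'LOF', etc.)
--     candidats = list(liste_scores_configurations[0].keys())
--     # Initialiser le score de Borda pour chaque candidat à 0
--     scores_borda = {c: 0 for c in candidats}
--
--     # 2. Parcourir toutes les configurations (tous les classements ou jeux de données)
--     for config_scores in liste_scores_configurations:
--
--         # Comparer chaque candidat avec tous les autres dans ce classement précis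
--         for i in range(len(candidats)):
--             candidat_A = candidats[i]
--             score_A = config_scores.get(candidat_A, 0) # Sécurité si un score est manquant
--
--             for j in range(i + 1, len(candidats)):
--                 candidat_B = candidats[j]
--                 score_B = config_scores.get(candidat_B, 0)
--
--                 # Attribution des points selon les règles de Borda modifiées
--                 if score_A > score_B:
--                     scores_borda[candidat_A] += 2
--                 elif score_A < score_B:
--                     scores_borda[candidat_B] += 2
--                 else:
--                     # Égalité
--                     scores_borda[candidat_A] += 1
--                     scores_borda[candidat_B] += 1
--
--     # 3. Trier le dictionnaire du vainqueur au perdant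
--     classement_trie = dict(sorted(scores_borda.items(), key=lambda item: item[1], reverse=True))
--
--     return classement_trie
-- ===== SOURCE B (Python) =====
-- def calculer(liste_scores_configurations):
--     if not liste_scores_configurations:
--         return {}
--     candidats = list(liste_scores_configurations[0].keys())
--     totals = {c: 0 for c in candidats}
--     for config_scores in liste_scores_configurations:
--         vals = [config_scores.get(c, 0) for c in candidats]
--         cnt = {}
--         for v in vals:
--             cnt[v] = cnt.get(v, 0) + 1
--         lower = {}
--         acc = 0
--         for s in sorted(cnt):
--             lower[s] = acc
--             acc += cnt[s]
--         for c, v in zip(candidats, vals):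
--             totals[c] += 2 * lower[v] + (cnt[v] - 1)
--     return dict(sorted(totals.items(), key=lambda item: item[1], reverse=True))
-- ===== Notes on version B (the rewrite author's own statement) =====
-- stated objective: faster
-- what changed: A compares every pair of candidates per configuration (nested i<j loops with mutual score updates); B instead, per configuration, builds a value-count dict and a prefix-sum dict over the sorted distinct scores and gives each candidate 2*(#strictly lower)+(#tied) points directly.
import Mathlib
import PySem

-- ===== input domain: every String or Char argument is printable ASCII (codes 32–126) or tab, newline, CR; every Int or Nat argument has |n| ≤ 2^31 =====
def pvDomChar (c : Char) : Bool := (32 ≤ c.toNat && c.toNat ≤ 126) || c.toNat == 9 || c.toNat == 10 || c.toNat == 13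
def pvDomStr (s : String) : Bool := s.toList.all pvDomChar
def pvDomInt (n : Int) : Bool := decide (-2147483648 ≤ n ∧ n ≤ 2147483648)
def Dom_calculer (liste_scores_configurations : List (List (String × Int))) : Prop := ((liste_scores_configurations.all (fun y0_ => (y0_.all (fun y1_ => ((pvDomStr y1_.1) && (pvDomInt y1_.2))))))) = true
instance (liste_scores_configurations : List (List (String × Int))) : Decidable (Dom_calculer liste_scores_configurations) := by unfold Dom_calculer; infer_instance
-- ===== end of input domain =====

-- B replaces A's pairwise double loop (compare every pair of candidates per configuration)
-- by per-candidate rank counting: a value-count dict and a prefix-sum dict over the sorted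
-- distinct scores give each candidate 2*(#strictly lower) + (#tied) points directly.

-- shared helper: config_scores.get(c, 0), the dict the association list represents
def pvGet (cfg : List (String × Int)) (c : String) : Int := (PySem.Dict.mk cfg).getD c 0

-- ===== PORT A =====
def calculer (liste_scores_configurations : List (List (String × Int))) : List (String × Int) :=
  match liste_scores_configurations with
  | [] => []
  | first :: _ =>
    let candidats : List String := (PySem.Dict.mk first).keys
    let scores0 : PySem.Dict String Int :=
      candidats.foldl (fun d c => d.insert c 0) PySem.Dict.empty
    let scores := liste_scores_configurations.foldl (fun sc cfg =>
      (PySem.List.pyRange 0 (candidats.length : Int)).foldl (fun sc i =>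
        let cA := PySem.List.pyGetD candidats i ""
        let sA := pvGet cfg cA
        (PySem.List.pyRange (i + 1) (candidats.length : Int)).foldl (fun sc j =>
          let cB := PySem.List.pyGetD candidats j ""
          let sB := pvGet cfg cB
          if sA > sB then sc.modify cA 0 (· + 2)   -- scores_borda[candidat_A] += 2 (key always present)
          else if sA < sB then sc.modify cB 0 (· + 2)
          else (sc.modify cA 0 (· + 1)).modify cB 0 (· + 1)) sc) sc) scores0
    (PySem.Dict.ofList (PySem.List.sorted scores.items (fun it => it.2) true)).items

-- ===== PORT B =====
def calculer_alt (liste_scores_configurations : List (List (String × Int))) : List (String × Int) :=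
  match liste_scores_configurations with
  | [] => []
  | first :: _ =>
    let candidats : List String := (PySem.Dict.mk first).keys
    let totals0 : PySem.Dict String Int :=
      candidats.foldl (fun d c => d.insert c 0) PySem.Dict.empty
    let totals := liste_scores_configurations.foldl (fun tot cfg =>
      let vals := candidats.map (fun c => pvGet cfg c)
      let cnt := vals.foldl (fun d v => d.insert v (d.getD v 0 + 1)) PySem.Dict.empty
      let lower := ((PySem.List.sorted cnt.keys (fun s => s) false).foldl
          (fun (p : PySem.Dict Int Int × Int) s => (p.1.insert s p.2, p.2 + cnt.getD s 0))
          (PySem.Dict.empty, 0)).1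
      (candidats.zip vals).foldl (fun tot cv =>
          tot.modify cv.1 0 (· + (2 * lower.getD cv.2 0 + (cnt.getD cv.2 0 - 1)))) tot)  -- totals[c] += … (key always present)
      totals0
    (PySem.Dict.ofList (PySem.List.sorted totals.items (fun it => it.2) true)).items

-- ===== PRECONDITION & SPEC =====
-- Pre_ excludes inputs where some configuration's association list has duplicate keys:
-- such lists do not represent Python dicts (A's and B's actual arguments are dicts, whose keys are unique).
def Pre_calculer (liste_scores_configurations : List (List (String × Int))) : Prop :=
  ∀ cfg ∈ liste_scores_configurations, (cfg.map Prod.fst).Nodup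
instance (liste_scores_configurations : List (List (String × Int))) : Decidable (Pre_calculer liste_scores_configurations) := by unfold Pre_calculer; infer_instance
def pvWitness_calculer : (List (List (String × Int))) :=
  [[("IF", 3), ("LOF", 1)], [("IF", 1), ("LOF", 1)]]

def Spec_calculer (liste_scores_configurations : List (List (String × Int))) (out : List (String × Int)) : Prop := out = calculer_alt liste_scores_configurations
instance (liste_scores_configurations : List (List (String × Int))) (out : List (String × Int)) : Decidable (Spec_calculer liste_scores_configurations out) := by unfold Spec_calculer; infer_instance

-- ===== CLAIM (what is proved, stated in full; the proofs are below) =====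
def Claim_equal_calculer : Prop := ∀ (liste_scores_configurations : List (List (String × Int))), Dom_calculer liste_scores_configurations → Pre_calculer liste_scores_configurations → Spec_calculer liste_scores_configurations (calculer liste_scores_configurations)

-- ===== LEMMAS AND PROOFS =====

-- d[c] += k on an Int-valued dict
def pvIncr (d : PySem.Dict String Int) (c : String) (k : Int) : PySem.Dict String Int :=
  d.modify c 0 (· + k)

-- Borda points v receives against a single opposing score w
def pvF (v w : Int) : Int := if v > w then 2 else if v < w then 0 else 1

-- Borda points v receives against every candidate of cs (scored by f), itself included
def pvSumF (f : String → Int) (v : Int) (cs : List String) : Int :=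
  (cs.map (fun c => pvF v (f c))).sum

-- A's inner loop: candidate c (score f c) against each c' of cs
def pvInner (f : String → Int) (c : String) (d : PySem.Dict String Int) (cs : List String) :
    PySem.Dict String Int :=
  cs.foldl (fun d c' =>
    if f c > f c' then pvIncr d c 2
    else if f c < f c' then pvIncr d c' 2
    else pvIncr (pvIncr d c 1) c' 1) d

-- A's double loop over all pairs of cs
def pvProcA (f : String → Int) (d : PySem.Dict String Int) : List String → PySem.Dict String Int
  | [] => d
  | c :: r => pvProcA f (pvInner f c d r) r

-- total added to key x by pvProcA
def pvDeltaA (f : String → Int) (x : String) : List String → Int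
  | [] => 0
  | c :: r => (if x = c then pvSumF f (f c) r else 0)
      + ((r.filter (fun c' => c' == x)).map (fun c' => pvF (f c') (f c))).sum
      + pvDeltaA f x r

-- A's per-configuration loop body (exactly the port's lambda)
def pvAStep (cs : List String) (sc : PySem.Dict String Int) (cfg : List (String × Int)) :
    PySem.Dict String Int :=
  (PySem.List.pyRange 0 (cs.length : Int)).foldl (fun sc i =>
    let cA := PySem.List.pyGetD cs i ""
    let sA := pvGet cfg cA
    (PySem.List.pyRange (i + 1) (cs.length : Int)).foldl (fun sc j =>
      let cB := PySem.List.pyGetD cs j ""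
      let sB := pvGet cfg cB
      if sA > sB then sc.modify cA 0 (· + 2)
      else if sA < sB then sc.modify cB 0 (· + 2)
      else (sc.modify cA 0 (· + 1)).modify cB 0 (· + 1)) sc) sc

-- B's per-configuration loop body (exactly the port's lambda)
def pvBStep (cs : List String) (tot : PySem.Dict String Int) (cfg : List (String × Int)) :
    PySem.Dict String Int :=
  let vals := cs.map (fun c => pvGet cfg c)
  let cnt := vals.foldl (fun d v => d.insert v (d.getD v 0 + 1)) PySem.Dict.empty
  let lower := ((PySem.List.sorted cnt.keys (fun s => s) false).foldl
      (fun (p : PySem.Dict Int Int × Int) s => (p.1.insert s p.2, p.2 + cnt.getD s 0))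
      (PySem.Dict.empty, 0)).1
  (cs.zip vals).foldl (fun tot cv =>
      tot.modify cv.1 0 (· + (2 * lower.getD cv.2 0 + (cnt.getD cv.2 0 - 1)))) tot

-- B's count and prefix-sum dicts and per-candidate points, named
def pvCnt (cfg : List (String × Int)) (cs : List String) : PySem.Dict Int Int :=
  (cs.map (fun c => pvGet cfg c)).foldl (fun d v => d.insert v (d.getD v 0 + 1)) PySem.Dict.empty

def pvLower (cfg : List (String × Int)) (cs : List String) : PySem.Dict Int Int :=
  ((PySem.List.sorted (pvCnt cfg cs).keys (fun s => s) false).foldl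
      (fun (p : PySem.Dict Int Int × Int) s => (p.1.insert s p.2, p.2 + (pvCnt cfg cs).getD s 0))
      (PySem.Dict.empty, 0)).1

def pvPts (cfg : List (String × Int)) (cs : List String) (c : String) : Int :=
  2 * (pvLower cfg cs).getD (pvGet cfg c) 0 + ((pvCnt cfg cs).getD (pvGet cfg c) 0 - 1)

theorem getD_pvIncr (d : PySem.Dict String Int) (c x : String) (k : Int) :
    (pvIncr d c k).getD x 0 = d.getD x 0 + if x = c then k else 0 := by
  unfold pvIncr
  rw [PySem.Dict.getD_modify]
  split_ifs with h
  · subst h; ring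
  · ring

theorem keys_pvIncr (d : PySem.Dict String Int) (c : String) (k : Int) (h : c ∈ d.keys) :
    (pvIncr d c k).keys = d.keys := by
  unfold pvIncr
  rw [PySem.Dict.keys_modify, PySem.Dict.keys_insert_of_contains]
  exact (PySem.Dict.contains_iff_mem_keys _ _).mpr h

theorem pvSumF_cons (f : String → Int) (v : Int) (c : String) (cs : List String) :
    pvSumF f v (c :: cs) = pvF v (f c) + pvSumF f v cs := by
  simp [pvSumF]

theorem getD_step (f : String → Int) (c c' x : String) (d : PySem.Dict String Int) :
    ((if f c > f c' then pvIncr d c 2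
      else if f c < f c' then pvIncr d c' 2
      else pvIncr (pvIncr d c 1) c' 1)).getD x 0
    = d.getD x 0 + (if x = c then pvF (f c) (f c') else 0) + (if x = c' then pvF (f c') (f c) else 0) := by
  unfold pvF
  split_ifs <;> simp_all [getD_pvIncr] <;> omega

theorem getD_pvInner (f : String → Int) (c x : String) :
    ∀ (cs : List String) (d : PySem.Dict String Int),
    (pvInner f c d cs).getD x 0 = d.getD x 0 + (if x = c then pvSumF f (f c) cs else 0)
      + ((cs.filter (fun c' => c' == x)).map (fun c' => pvF (f c') (f c))).sum := by
  intro cs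
  induction cs with
  | nil => intro d; simp [pvInner, pvSumF]
  | cons c' r ih =>
    intro d
    show (pvInner f c _ r).getD x 0 = _
    rw [ih, getD_step, pvSumF_cons]
    by_cases hx : c' = x
    · subst hx
      simp only [List.filter_cons, beq_self_eq_true, if_pos]
      simp
      split_ifs <;> ring
    · have : (c' == x) = false := by simp [hx]
      simp only [List.filter_cons, this]
      have : (x = c') = False := by simp [Ne.symm hx]
      simp [this]
      split_ifs <;> ring

theorem keys_pvInner (f : String → Int) (c : String) :
    ∀ (cs : List String) (d : PySem.Dict String Int), c ∈ d.keys → (∀ c' ∈ cs, c' ∈ d.keys) →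
    (pvInner f c d cs).keys = d.keys := by
  intro cs
  induction cs with
  | nil => intro d _ _; rfl
  | cons c' r ih =>
    intro d hc hall
    show (pvInner f c _ r).keys = _
    have hc' : c' ∈ d.keys := hall c' (by simp)
    have hstep : ((if f c > f c' then pvIncr d c 2
      else if f c < f c' then pvIncr d c' 2
      else pvIncr (pvIncr d c 1) c' 1)).keys = d.keys := by
      split_ifs
      · exact keys_pvIncr d c 2 hc
      · exact keys_pvIncr d c' 2 hc'
      · rw [keys_pvIncr _ c' 1 (by rw [keys_pvIncr d c 1 hc]; exact hc'),
            keys_pvIncr d c 1 hc]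
    rw [ih _ (by rw [hstep]; exact hc) (fun y hy => by rw [hstep]; exact hall y (by simp [hy]))]
    exact hstep

theorem pvDeltaA_cons (f : String → Int) (x c : String) (r : List String) :
    pvDeltaA f x (c :: r) = (if x = c then pvSumF f (f c) r else 0)
      + ((r.filter (fun c' => c' == x)).map (fun c' => pvF (f c') (f c))).sum
      + pvDeltaA f x r := rfl

theorem getD_pvProcA (f : String → Int) (x : String) :
    ∀ (cs : List String) (d : PySem.Dict String Int),
    (pvProcA f d cs).getD x 0 = d.getD x 0 + pvDeltaA f x cs := by
  intro cs
  induction cs with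
  | nil => intro d; simp [pvProcA, pvDeltaA]
  | cons c r ih =>
    intro d
    show (pvProcA f (pvInner f c d r) r).getD x 0 = _
    rw [ih, getD_pvInner]
    rw [pvDeltaA_cons]
    ring

theorem keys_pvProcA (f : String → Int) :
    ∀ (cs : List String) (d : PySem.Dict String Int), (∀ c' ∈ cs, c' ∈ d.keys) →
    (pvProcA f d cs).keys = d.keys := by
  intro cs
  induction cs with
  | nil => intro d _; rfl
  | cons c r ih =>
    intro d hall
    show (pvProcA f (pvInner f c d r) r).keys = _
    have hk : (pvInner f c d r).keys = d.keys :=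
      keys_pvInner f c r d (hall c (by simp)) (fun y hy => hall y (by simp [hy]))
    rw [ih _ (fun y hy => by rw [hk]; exact hall y (by simp [hy])), hk]

theorem sum_map_add_int {α : Type} (l : List α) (g h : α → Int) :
    (l.map (fun a => g a + h a)).sum = (l.map g).sum + (l.map h).sum := by
  induction l with
  | nil => simp
  | cons a l ih => simp [ih]; ring

theorem pvF_self (v : Int) : pvF v v = 1 := by simp [pvF]

-- regrouping: the pairwise total of x equals the per-occurrence rank count
theorem pvDeltaA_eq (f : String → Int) (x : String) :
    ∀ cs : List String,
    pvDeltaA f x cs = ((cs.filter (fun c => c == x)).map (fun c => pvSumF f (f c) cs - 1)).sum := by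
  intro cs
  induction cs with
  | nil => simp [pvDeltaA]
  | cons c0 r ih =>
    show (if x = c0 then pvSumF f (f c0) r else 0) + _ + pvDeltaA f x r = _
    rw [ih]
    by_cases h0 : c0 = x
    · subst h0
      simp only [List.filter_cons, beq_self_eq_true, if_pos, List.map_cons, List.sum_cons]
      rw [pvSumF_cons, pvF_self]
      have : ∀ l : List String, (l.map (fun c => pvSumF f (f c) (c0 :: r) - 1)).sum
          = (l.map (fun c => pvF (f c) (f c0))).sum + (l.map (fun c => pvSumF f (f c) r - 1)).sum := by
        intro l
        rw [← sum_map_add_int]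
        apply congrArg
        apply List.map_congr_left
        intro c _
        rw [pvSumF_cons]; ring
      rw [this]
      simp
      ring
    · have hb : (c0 == x) = false := by simp [h0]
      simp only [List.filter_cons, hb, Bool.false_eq_true, if_neg, not_false_iff]
      have hx0 : (x = c0) = False := by simp [Ne.symm h0]
      simp only [hx0, if_false]
      have : ∀ l : List String, (l.map (fun c => pvSumF f (f c) (c0 :: r) - 1)).sum
          = (l.map (fun c => pvF (f c) (f c0))).sum + (l.map (fun c => pvSumF f (f c) r - 1)).sum := by
        intro l
        rw [← sum_map_add_int]
        apply congrArg
        apply List.map_congr_left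
        intro c _
        rw [pvSumF_cons]; ring
      rw [this]
      ring

-- B-side: a fold of '+= pts c' updates
theorem getD_foldl_pts (pts : String → Int) (x : String) :
    ∀ (cs : List String) (tot : PySem.Dict String Int),
    (cs.foldl (fun tot c => tot.modify c 0 (· + pts c)) tot).getD x 0
      = tot.getD x 0 + ((cs.filter (fun c => c == x)).map pts).sum := by
  intro cs
  induction cs with
  | nil => intro tot; simp
  | cons c r ih =>
    intro tot
    simp only [List.foldl_cons]
    rw [ih]
    have : (tot.modify c 0 (· + pts c)) = pvIncr tot c (pts c) := rfl
    rw [this, getD_pvIncr]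
    by_cases h : c = x
    · subst h; simp [List.filter_cons]; ring
    · have hb : (c == x) = false := by simp [h]
      have hx : (x = c) = False := by simp [Ne.symm h]
      simp [List.filter_cons, hb, hx]

theorem keys_foldl_pts (pts : String → Int) :
    ∀ (cs : List String) (tot : PySem.Dict String Int), (∀ c ∈ cs, c ∈ tot.keys) →
    (cs.foldl (fun tot c => tot.modify c 0 (· + pts c)) tot).keys = tot.keys := by
  intro cs
  induction cs with
  | nil => intro tot _; rfl
  | cons c r ih =>
    intro tot hall
    simp only [List.foldl_cons]
    have hk : (tot.modify c 0 (· + pts c)).keys = tot.keys :=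
      keys_pvIncr tot c (pts c) (hall c (by simp))
    rw [ih _ (fun y hy => by rw [hk]; exact hall y (by simp [hy])), hk]

-- rank-count characterisation of pvSumF
theorem pvSumF_counts (vs : List Int) (v : Int) :
    (vs.map (fun w => pvF v w)).sum
      = 2 * (vs.countP (fun w => decide (w < v)) : Int) + (vs.count v : Int) := by
  induction vs with
  | nil => simp
  | cons w r ih =>
    rw [List.map_cons, List.sum_cons, ih]
    simp only [List.countP_cons, List.count_cons, pvF, beq_iff_eq]
    push_cast
    split_ifs <;> (simp only [decide_eq_true_eq, decide_eq_false_iff_not] at *) <;> omega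

-- the prefix-sum fold: lookup of v = sum of g over the strictly smaller processed keys
theorem getD_lowerfold (g : Int → Int) :
    ∀ (ss : List Int), ss.Pairwise (· < ·) →
    ∀ (d : PySem.Dict Int Int) (a v : Int),
    ((ss.foldl (fun p s => (p.1.insert s p.2, p.2 + g s)) (d, a)).1).getD v 0
      = if v ∈ ss then a + ((ss.filter (fun s => decide (s < v))).map g).sum else d.getD v 0 := by
  intro ss
  induction ss with
  | nil => intro _ d a v; simp
  | cons s0 r ih =>
    intro hp d a v
    have hpr : r.Pairwise (· < ·) := hp.of_cons
    have hhead : ∀ s ∈ r, s0 < s := fun s hs => List.rel_of_pairwise_cons hp hs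
    simp only [List.foldl_cons]
    rw [ih hpr]
    by_cases hvr : v ∈ r
    · have h0v : s0 < v := hhead v hvr
      have hm : v ∈ s0 :: r := by simp [hvr]
      simp only [hvr, if_pos, hm, List.filter_cons]
      have : (decide (s0 < v)) = true := by simp [h0v]
      rw [this]
      simp
      ring
    · by_cases hv0 : v = s0
      · subst hv0
        have hmem : v ∈ v :: r := by simp
        simp only [hvr, if_pos, hmem, PySem.Dict.getD_insert_self, List.filter_cons]
        have h1 : (decide (v < v)) = false := by simp
        rw [h1]
        have h2 : r.filter (fun s => decide (s < v)) = [] := by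
          apply List.filter_eq_nil_iff.mpr
          intro s hs
          simp only [decide_eq_true_eq]
          exact not_lt.mpr (le_of_lt (hhead s hs))
        simp [h2]
      · have hnm : ¬ v ∈ s0 :: r := by simp [hv0, hvr]
        simp only [hvr, hnm]
        rw [PySem.Dict.getD_insert_of_ne _ _ _ hv0]
        simp [hvr]

theorem countP_filter_beq (p : Int → Bool) (a : Int) (l : List Int) :
    (l.filter (fun w => w == a)).countP p = if p a then l.count a else 0 := by
  induction l with
  | nil => simp
  | cons w r ih =>
    simp only [List.filter_cons, List.count_cons]
    by_cases h : w = a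
    · subst h
      simp only [beq_self_eq_true, if_pos, List.countP_cons, ih]
      split_ifs <;> simp_all
    · have hb : (w == a) = false := by simp [h]
      simp [hb, ih, h]

theorem countP_split (p : Int → Bool) (a : Int) (l : List Int) :
    (l.countP p : Int)
      = ((l.filter (fun w => !(w == a))).countP p : Int) + if p a then (l.count a : Int) else 0 := by
  have hperm : (l.filter (fun w => w == a) ++ l.filter (fun w => !(w == a))).Perm l :=
    List.filter_append_perm _ l
  have h := hperm.countP_eq p
  rw [List.countP_append] at h
  rw [← h, countP_filter_beq]
  push_cast
  split_ifs <;> ring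

-- summing per-distinct-value counts = counting
theorem sum_count_filter :
    ∀ (ss : List Int) (vals : List Int), ss.Nodup → (∀ s, s ∈ ss ↔ s ∈ vals) →
    ∀ p : Int → Bool,
    ((ss.filter p).map (fun s => (vals.count s : Int))).sum = (vals.countP p : Int) := by
  intro ss
  induction ss with
  | nil =>
    intro vals _ hmem p
    have : vals = [] := by
      cases vals with
      | nil => rfl
      | cons v r => exact absurd ((hmem v).mpr (by simp)) (by simp)
    simp [this]
  | cons s0 r ih =>
    intro vals hnd hmem p
    have hnd' : r.Nodup := hnd.of_cons
    have hs0r : s0 ∉ r := by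
      intro h; exact (List.nodup_cons.mp hnd).1 h
    set vals' := vals.filter (fun w => !(w == s0)) with hv'
    have hmem' : ∀ s, s ∈ r ↔ s ∈ vals' := by
      intro s
      constructor
      · intro hs
        have hne : s ≠ s0 := fun he => hs0r (he ▸ hs)
        have : s ∈ vals := (hmem s).mp (by simp [hs])
        simp [hv', List.mem_filter, this, hne]
      · intro hs
        rw [hv', List.mem_filter] at hs
        have hne : s ≠ s0 := by simpa using hs.2
        have := (hmem s).mpr hs.1
        simp only [List.mem_cons] at this
        tauto
    have hcnt : ∀ s ∈ r.filter p, (vals.count s : Int) = (vals'.count s : Int) := by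
      intro s hs
      have hsr : s ∈ r := (List.mem_filter.mp hs).1
      have hne : s ≠ s0 := fun he => hs0r (he ▸ hsr)
      rw [hv', List.count_filter]
      simp [hne]
    rw [List.filter_cons]
    by_cases hp : p s0
    · simp only [hp, if_pos, List.map_cons, List.sum_cons]
      rw [List.map_congr_left hcnt, ih vals' hnd' hmem' p, countP_split p s0 vals, ← hv']
      simp only [hp, if_pos]
      ring
    · simp only [hp, Bool.false_eq_true, if_neg, not_false_iff]
      rw [List.map_congr_left hcnt, ih vals' hnd' hmem' p, countP_split p s0 vals, ← hv']
      simp [hp]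

-- pvCnt is the counter of the value list
theorem pvCnt_eq_counter (cfg : List (String × Int)) (cs : List String) :
    pvCnt cfg cs = PySem.Dict.counter (cs.map (fun c => pvGet cfg c)) :=
  PySem.Dict.foldl_insert_getD_add_one_eq_counter _

-- per-candidate points of B = rank-count form of pvSumF
theorem pvPts_eq (cfg : List (String × Int)) (cs : List String) (c : String) (hc : c ∈ cs) :
    pvPts cfg cs c = pvSumF (pvGet cfg) (pvGet cfg c) cs - 1 := by
  set f := pvGet cfg with hf
  set vals := cs.map f with hvals
  have hvmem : f c ∈ vals := by
    rw [hvals]; exact List.mem_map_of_mem hc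
  set ss := PySem.List.sorted (pvCnt cfg cs).keys (fun s => s) false with hss
  have hkeys : (pvCnt cfg cs).keys = PySem.Set.ofList vals := by
    rw [pvCnt_eq_counter, PySem.Dict.keys_counter]
  have hpair : ss.Pairwise (· < ·) := by
    rw [hss, hkeys]
    exact PySem.List.sorted_ofList_pairwise_lt vals
  have hmemss : ∀ s, s ∈ ss ↔ s ∈ vals := by
    intro s
    rw [hss, PySem.List.mem_sorted, hkeys, PySem.Set.mem_ofList]
  have hndss : ss.Nodup := by
    have hperm : ss.Perm ((pvCnt cfg cs).keys) := PySem.List.sorted_perm _ _ _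
    have : (PySem.Set.ofList vals).Nodup := PySem.Set.nodup_ofList vals
    exact (hperm.nodup_iff).mpr (hkeys ▸ this)
  have hcntD : ∀ v : Int, (pvCnt cfg cs).getD v 0 = (vals.count v : Int) := by
    intro v
    rw [pvCnt_eq_counter]
    exact PySem.Dict.getD_counter _ _
  have hlow : (pvLower cfg cs).getD (f c) 0 = (vals.countP (fun w => decide (w < f c)) : Int) := by
    show ((ss.foldl (fun p s => (p.1.insert s p.2, p.2 + (pvCnt cfg cs).getD s 0))
        (PySem.Dict.empty, 0)).1).getD (f c) 0 = _
    rw [getD_lowerfold _ ss hpair PySem.Dict.empty 0 (f c)]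
    rw [if_pos ((hmemss (f c)).mpr hvmem)]
    rw [List.map_congr_left (fun s _ => hcntD s)]
    rw [sum_count_filter ss vals hndss hmemss]
    ring
  unfold pvPts
  rw [← hf, hlow, hcntD]
  have : pvSumF f (f c) cs = (vals.map (fun w => pvF (f c) w)).sum := by
    rw [hvals, List.map_map]; rfl
  rw [this, pvSumF_counts]
  ring

-- A's outer pyRange loop is the structural pair recursion
theorem bridgeA (cfg : List (String × Int)) (cs : List String) :
    ∀ (n k : Nat) (sc : PySem.Dict String Int), cs.length - k = n →
    (PySem.List.pyRange (k : Int) (cs.length : Int)).foldl (fun sc i =>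
      let cA := PySem.List.pyGetD cs i ""
      let sA := pvGet cfg cA
      (PySem.List.pyRange (i + 1) (cs.length : Int)).foldl (fun sc j =>
        let cB := PySem.List.pyGetD cs j ""
        let sB := pvGet cfg cB
        if sA > sB then sc.modify cA 0 (· + 2)
        else if sA < sB then sc.modify cB 0 (· + 2)
        else (sc.modify cA 0 (· + 1)).modify cB 0 (· + 1)) sc) sc
    = pvProcA (pvGet cfg) sc (cs.drop k) := by
  intro n
  induction n with
  | zero =>
    intro k sc h
    have h1 : PySem.List.pyRange (k : Int) (cs.length : Int) = [] := by
      rw [List.eq_nil_iff_forall_not_mem]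
      intro x hx
      rw [PySem.List.mem_pyRange_one] at hx
      omega
    have h2 : cs.drop k = [] := List.drop_eq_nil_of_le (by omega)
    rw [h1, h2]
    rfl
  | succ n ih =>
    intro k sc h
    have hk : k < cs.length := by omega
    have hkI : (k : Int) < (cs.length : Int) := by exact_mod_cast hk
    have hsucc : ((k : Int) + 1) = (((k + 1 : Nat)) : Int) := by push_cast; ring
    have hget : PySem.List.pyGetD cs ((k : Nat) : Int) "" = cs[k] := by
      rw [PySem.List.pyGetD_natCast]
      exact List.getD_eq_getElem cs "" hk
    have hdrop : cs.drop k = cs[k] :: cs.drop (k + 1) := (List.getElem_cons_drop hk).symm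
    rw [PySem.List.pyRange_one_cons hkI, List.foldl_cons, hsucc, hdrop]
    show _ = pvProcA (pvGet cfg) (pvInner (pvGet cfg) cs[k] sc (cs.drop (k + 1))) (cs.drop (k + 1))
    rw [← ih (k + 1) (pvInner (pvGet cfg) cs[k] sc (cs.drop (k + 1))) (by omega)]
    congr 1
    show (PySem.List.pyRange ((k : Int) + 1) (cs.length : Int)).foldl _ sc = _
    rw [hsucc]
    rw [PySem.List.foldl_pyRange_pyGetD' cs ""
      (fun (sc : PySem.Dict String Int) (cB : String) =>
        let sB := pvGet cfg cB
        if pvGet cfg (PySem.List.pyGetD cs ((k : Nat) : Int) "") > sB then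
          sc.modify (PySem.List.pyGetD cs ((k : Nat) : Int) "") 0 (· + 2)
        else if pvGet cfg (PySem.List.pyGetD cs ((k : Nat) : Int) "") < sB then
          sc.modify cB 0 (· + 2)
        else (sc.modify (PySem.List.pyGetD cs ((k : Nat) : Int) "") 0 (· + 1)).modify cB 0 (· + 1))
      sc (by positivity)]
    simp only [hget, Int.toNat_natCast]
    rfl

theorem pvAStep_eq_procA (cfg : List (String × Int)) (cs : List String)
    (sc : PySem.Dict String Int) :
    pvAStep cs sc cfg = pvProcA (pvGet cfg) sc cs := by
  have h := bridgeA cfg cs cs.length 0 sc (by omega)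
  simpa [pvAStep] using h

theorem pvBStep_eq_foldl (cfg : List (String × Int)) (cs : List String)
    (tot : PySem.Dict String Int) :
    pvBStep cs tot cfg = cs.foldl (fun tot c => tot.modify c 0 (· + pvPts cfg cs c)) tot := by
  show (cs.zip (cs.map (fun c => pvGet cfg c))).foldl (fun tot cv =>
      tot.modify cv.1 0 (· + (2 * (pvLower cfg cs).getD cv.2 0 + ((pvCnt cfg cs).getD cv.2 0 - 1)))) tot = _
  have hz : cs.zip (cs.map (fun c => pvGet cfg c)) = cs.map (fun c => (c, pvGet cfg c)) := by
    have h := @List.zip_map' String String Int (fun c : String => c) (fun c => pvGet cfg c) cs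
    simpa using h
  rw [hz, List.foldl_map]
  rfl

theorem keys_pvAStep (cfg : List (String × Int)) (cs : List String)
    (tot : PySem.Dict String Int) (hkeys : tot.keys = cs) :
    (pvAStep cs tot cfg).keys = cs := by
  rw [pvAStep_eq_procA, keys_pvProcA _ _ _ (fun c hc => by rw [hkeys]; exact hc), hkeys]

-- the two per-configuration bodies agree on any totals dict keyed by cs
theorem step_eq (cfg : List (String × Int)) (cs : List String) (hnd : cs.Nodup)
    (tot : PySem.Dict String Int) (hkeys : tot.keys = cs) :
    pvAStep cs tot cfg = pvBStep cs tot cfg := by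
  have hmem : ∀ c ∈ cs, c ∈ tot.keys := fun c hc => hkeys ▸ hc
  have kA : (pvAStep cs tot cfg).keys = cs := keys_pvAStep cfg cs tot hkeys
  have kB : (pvBStep cs tot cfg).keys = cs := by
    rw [pvBStep_eq_foldl, keys_foldl_pts _ _ _ hmem, hkeys]
  apply PySem.Dict.ext
  rw [PySem.Dict.items_eq_map_keys _ (by rw [kA]; exact hnd) 0,
      PySem.Dict.items_eq_map_keys _ (by rw [kB]; exact hnd) 0, kA, kB]
  apply List.map_congr_left
  intro x _
  have hA : (pvAStep cs tot cfg).getD x 0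
      = tot.getD x 0 + ((cs.filter (fun c => c == x)).map (fun c => pvSumF (pvGet cfg) (pvGet cfg c) cs - 1)).sum := by
    rw [pvAStep_eq_procA, getD_pvProcA, pvDeltaA_eq]
  have hB : (pvBStep cs tot cfg).getD x 0
      = tot.getD x 0 + ((cs.filter (fun c => c == x)).map (fun c => pvPts cfg cs c)).sum := by
    rw [pvBStep_eq_foldl, getD_foldl_pts]
  rw [hA, hB]
  have : ((cs.filter (fun c => c == x)).map (fun c => pvPts cfg cs c)).sum
      = ((cs.filter (fun c => c == x)).map (fun c => pvSumF (pvGet cfg) (pvGet cfg c) cs - 1)).sum := by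
    apply congrArg
    apply List.map_congr_left
    intro c hcf
    exact pvPts_eq cfg cs c (List.mem_filter.mp hcf).1
  rw [this]

theorem fold_eq (cs : List String) (hnd : cs.Nodup) :
    ∀ (L : List (List (String × Int))) (tot : PySem.Dict String Int), tot.keys = cs →
    L.foldl (pvAStep cs) tot = L.foldl (pvBStep cs) tot := by
  intro L
  induction L with
  | nil => intro tot _; rfl
  | cons cfg L' ih =>
    intro tot hkeys
    simp only [List.foldl_cons]
    rw [← step_eq cfg cs hnd tot hkeys, ih _ (keys_pvAStep cfg cs tot hkeys)]

theorem keys_init (cs : List String) (hnd : cs.Nodup) :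
    (cs.foldl (fun d c => d.insert c (0:Int)) PySem.Dict.empty).keys = cs := by
  have h := PySem.Dict.keys_foldl_insert cs (fun _ _ => (0:Int)) PySem.Dict.empty
  simp only at h
  rw [h, PySem.Dict.keys_empty, PySem.Set.update_nil_left, PySem.Set.ofList_eq_self_of_nodup _ hnd]

-- ===== VERDICT (by name: the statement is the Claim_ definition above) =====
theorem calculer_spec : Claim_equal_calculer := by
  unfold Claim_equal_calculer
  intro L _hdom hpre
  unfold Spec_calculer
  cases L with
  | nil => rfl
  | cons first rest =>
    have hnd : ((PySem.Dict.mk first).keys).Nodup := by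
      have := hpre first (by simp)
      simpa [PySem.Dict.keys_mk] using this
    show (PySem.Dict.ofList (PySem.List.sorted
        (((first :: rest).foldl (pvAStep ((PySem.Dict.mk first).keys))
          (((PySem.Dict.mk first).keys).foldl (fun d c => d.insert c 0) PySem.Dict.empty))).items
        (fun it => it.2) true)).items
      = (PySem.Dict.ofList (PySem.List.sorted
        (((first :: rest).foldl (pvBStep ((PySem.Dict.mk first).keys))
          (((PySem.Dict.mk first).keys).foldl (fun d c => d.insert c 0) PySem.Dict.empty))).items
        (fun it => it.2) true)).items
    rw [fold_eq _ hnd _ _ (keys_init _ hnd)]
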